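-- pv_equiv track=rewrite | github.com/98-jeonghoon/AlgorithmStudy | 240910/좌우 반전시키기/flip-left-and-right.py | min_clicks_to_make_all_ones
-- ===== SOURCE A (Python) =====
-- def flip(arr, index):
--     # index 위치를 기준으로 좌우를 포함해 반전
--     arr[index] = 1 - arr[index]
--     if index - 1 >= 0:
--         arr[index - 1] = 1 - arr[index - 1]
--     if index + 1 < len(arr):
--         arr[index + 1] = 1 - arr[index + 1]
--
-- def min_clicks_to_make_all_ones(n, arr):
--     click_count = 0
--
--     for i in range(1, n):  # 첫 번째 칸은 제외하고 탐색
--         if arr[i - 1] == 0:  # 왼쪽 칸이 0이면 현재 칸을 눌러야 함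
--             flip(arr, i)
--             click_count += 1
--
--     # 마지막으로 모든 칸이 1로 변환되었는지 확인
--     if all(x == 1 for x in arr):
--         return click_count
--     else:
--         return -1
-- ===== SOURCE B (Python) =====
-- def min_clicks_to_make_all_ones(n, arr):
--     # Two-pass parity-table reformulation; agrees with A's RETURN VALUE
--     # (A mutates arr in place; B does not).
--     ln = len(arr)
--     c = [0] * (ln + 2)          # c[i] = 1 iff a click happens at position i
--     clicks = 0
--     for i in range(1, n):
--         p = (c[i - 1] + (c[i - 2] if i >= 2 else 0)) % 2
--         a = arr[i - 1]
--         if (p == 0 and a == 0) or (p == 1 and a == 1):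
--             c[i] = 1
--             clicks += 1
--     for k in range(ln):
--         par = (c[k] + c[k + 1] + (c[k - 1] if k >= 1 else 0)) % 2
--         ok = (arr[k] == 1) if par == 0 else (arr[k] == 0)
--         if not ok:
--             return -1
--     return clicks
-- ===== Notes on version B (the rewrite author's own statement) =====
-- stated objective: alternative
-- what changed: B replaces A's interleaved mutate-and-read greedy loop (physically flipping three cells per click) by two separate passes: a first pass that only builds a 0/1 clicks table from flip parities, and a second pass that checks each original cell against the parity of the three neighbouring clicks; arr is never mutated (equivalence is about the return value).
-- outside the precondition, e.g. on min_clicks_to_make_all_ones(2, [1]): A returns 0, B returns 0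
import Mathlib
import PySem

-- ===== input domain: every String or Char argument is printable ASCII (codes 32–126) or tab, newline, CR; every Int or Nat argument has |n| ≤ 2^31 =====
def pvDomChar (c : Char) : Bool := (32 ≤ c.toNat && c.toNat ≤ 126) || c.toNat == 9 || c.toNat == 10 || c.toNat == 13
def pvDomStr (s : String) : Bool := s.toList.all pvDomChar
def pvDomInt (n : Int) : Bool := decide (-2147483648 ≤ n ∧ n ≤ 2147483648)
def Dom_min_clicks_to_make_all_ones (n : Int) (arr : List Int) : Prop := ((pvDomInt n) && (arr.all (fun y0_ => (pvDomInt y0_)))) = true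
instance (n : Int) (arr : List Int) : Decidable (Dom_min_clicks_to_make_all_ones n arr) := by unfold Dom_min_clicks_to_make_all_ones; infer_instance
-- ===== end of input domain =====

-- B rebuilds A's greedy result from a clicks/parity table in two passes instead of mutating arr in place;
-- A mutates arr (B does not): the equivalence proved is about the RETURN value only.


-- ===== PORT A =====
-- flip(arr, index): flip arr[index] and its in-range neighbours (x ↦ 1 - x)
def pvFlip (arr : List Int) (index : Int) : List Int :=
  let a1 := PySem.List.pySetD arr index (1 - PySem.List.pyGetD arr index 0)
  let a2 := if index - 1 ≥ 0 then PySem.List.pySetD a1 (index - 1) (1 - PySem.List.pyGetD a1 (index - 1) 0) else a1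
  if index + 1 < (a2.length : Int) then PySem.List.pySetD a2 (index + 1) (1 - PySem.List.pyGetD a2 (index + 1) 0) else a2

-- body of A's for-loop over i (state: current arr, click_count)
def pvStepA (s : List Int × Int) (i : Int) : List Int × Int :=
  if PySem.List.pyGetD s.1 (i - 1) 0 == 0 then (pvFlip s.1 i, s.2 + 1) else s

def min_clicks_to_make_all_ones (n : Int) (arr : List Int) : Int :=
  let st := (PySem.List.pyRange 1 n 1).foldl pvStepA (arr, 0)
  if st.1.all (fun x => x == 1) then st.2 else -1

-- ===== PORT B =====
-- body of B's first pass (state: clicks table c, clicks count)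
def pvStepB (arr : List Int) (s : List Int × Int) (i : Int) : List Int × Int :=
  let p := (PySem.List.pyGetD s.1 (i - 1) 0 +
            (if i ≥ 2 then PySem.List.pyGetD s.1 (i - 2) 0 else 0)) % 2
  let a := PySem.List.pyGetD arr (i - 1) 0
  if (p == 0 && a == 0) || (p == 1 && a == 1) then
    (PySem.List.pySetD s.1 i 1, s.2 + 1)
  else s

-- body of B's second-pass check at position k
def pvOkB (arr c : List Int) (k : Int) : Bool :=
  let par := (PySem.List.pyGetD c k 0 + PySem.List.pyGetD c (k + 1) 0 +
              (if k ≥ 1 then PySem.List.pyGetD c (k - 1) 0 else 0)) % 2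
  if par == 0 then PySem.List.pyGetD arr k 0 == 1 else PySem.List.pyGetD arr k 0 == 0

-- Source B's early `return -1` inside the second for-loop is ported as List.all over the same range
def min_clicks_to_make_all_ones_alt (n : Int) (arr : List Int) : Int :=
  let st := (PySem.List.pyRange 1 n 1).foldl (pvStepB arr) (List.replicate (arr.length + 2) 0, 0)
  if (PySem.List.pyRange 0 (arr.length : Int) 1).all (pvOkB arr st.1) then st.2 else -1

-- ===== PRECONDITION & SPEC =====
-- Pre_ excludes n > len(arr): there A's click loop indexes past the end of arr and raises
-- IndexError (except in the boundary case where the loop stops right past the end on a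
-- non-zero last cell, where A still returns; B returns the same value on the cited example).
def Pre_min_clicks_to_make_all_ones (n : Int) (arr : List Int) : Prop :=
  n ≤ (arr.length : Int)
instance (n : Int) (arr : List Int) : Decidable (Pre_min_clicks_to_make_all_ones n arr) := by
  unfold Pre_min_clicks_to_make_all_ones; infer_instance

def pvWitness_min_clicks_to_make_all_ones : Int × List Int := (2, [0, 1])

def Spec_min_clicks_to_make_all_ones (n : Int) (arr : List Int) (out : Int) : Prop := out = min_clicks_to_make_all_ones_alt n arr
instance (n : Int) (arr : List Int) (out : Int) : Decidable (Spec_min_clicks_to_make_all_ones n arr out) := by unfold Spec_min_clicks_to_make_all_ones; infer_instance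

-- ===== CLAIM (what is proved, stated in full; the proofs are below) =====
def Claim_equal_min_clicks_to_make_all_ones : Prop := ∀ (n : Int) (arr : List Int), Dom_min_clicks_to_make_all_ones n arr → Pre_min_clicks_to_make_all_ones n arr → Spec_min_clicks_to_make_all_ones n arr (min_clicks_to_make_all_ones n arr)

-- ===== LEMMAS AND PROOFS =====

lemma getD_set' (l : List Int) (n k : Nat) (v : Int) (hn : n < l.length) :
    (l.set n v).getD k 0 = if k = n then v else l.getD k 0 := by
  rw [List.getD_eq_getElem?_getD, List.getD_eq_getElem?_getD, List.getElem?_set]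
  by_cases h : n = k
  · subst h; simp [hn]
  · simp only [if_neg h, if_neg (fun hh : k = n => h hh.symm)]

-- value of a cell holding x after s flips (each flip is x ↦ 1 - x)
def pvTw (x s : Int) : Int := if s % 2 = 1 then 1 - x else x

lemma pvTw_succ (x s : Int) : pvTw x (s + 1) = 1 - pvTw x s := by
  unfold pvTw
  rcases Int.emod_two_eq s with h | h <;> rcases Int.emod_two_eq (s+1) with h2 | h2 <;>
    simp [h, h2] <;> omega

-- total number of clicks affecting position k (Nat subtraction; harmless at k = 0 since c[0] = 0)
def pvPar (c : List Int) (k : Nat) : Int := c.getD (k - 1) 0 + c.getD k 0 + c.getD (k + 1) 0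

-- invariant relating A's mutated array to B's clicks table after loop iterations i = 1 .. m
def pvInv (arr Aarr c : List Int) (ca cb : Int) (m : Nat) : Prop :=
  Aarr.length = arr.length ∧ c.length = arr.length + 2 ∧ ca = cb ∧
  (∀ t : Nat, (t = 0 ∨ m < t) → c.getD t 0 = 0) ∧
  (∀ t : Nat, c.getD t 0 = 0 ∨ c.getD t 0 = 1) ∧
  (∀ k : Nat, k < arr.length → Aarr.getD k 0 = pvTw (arr.getD k 0) (pvPar c k))

lemma pvInv_zero (arr : List Int) :
    pvInv arr arr (List.replicate (arr.length + 2) 0) 0 0 0 := by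
  refine ⟨rfl, by simp, rfl, ?_, ?_, ?_⟩
  · intro t _; simp [List.getD]
  · intro t; left; simp [List.getD]
  · intro k hk; simp [pvPar, pvTw, List.getD]

lemma pvFlip_length (l : List Int) (index : Int) :
    (pvFlip l index).length = l.length := by
  rw [pvFlip]
  split_ifs <;> simp [PySem.List.length_pySetD]

lemma pvFlip_getD (l : List Int) (m : Nat) (hm : m + 1 < l.length) (k : Nat) (hk : k < l.length) :
    (pvFlip l ((m:Int)+1)).getD k 0 =
      if k = m ∨ k = m + 1 ∨ (k = m + 2 ∧ m + 2 < l.length) then 1 - l.getD k 0 else l.getD k 0 := by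
  have c1 : ((m:Int)+1) = ((m+1 : Nat) : Int) := by push_cast; ring
  rw [pvFlip, c1]
  rw [PySem.List.pySetD_natCast, PySem.List.pyGetD_natCast]
  rw [if_pos (show ((m+1:Nat):Int) - 1 ≥ 0 by push_cast; omega)]
  rw [show ((m+1:Nat):Int) - 1 = ((m:Nat):Int) by push_cast; ring]
  rw [PySem.List.pySetD_natCast, PySem.List.pyGetD_natCast]
  rw [show ((m+1:Nat):Int) + 1 = ((m+2:Nat):Int) by push_cast; ring]
  have hlen2 : ((l.set (m+1) (1 - l.getD (m+1) 0)).set m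
      (1 - (l.set (m+1) (1 - l.getD (m+1) 0)).getD m 0)).length = l.length := by
    simp
  by_cases h2 : m + 2 < l.length
  · rw [if_pos (by rw [hlen2]; exact_mod_cast h2)]
    rw [PySem.List.pySetD_natCast, PySem.List.pyGetD_natCast]
    have hm0 : m < l.length := by omega
    simp only [getD_set', List.length_set, hm, h2, hm0]
    split_ifs <;> first | rfl | omega | (exfalso; omega) | (simp_all)
  · rw [if_neg (by rw [hlen2]; exact_mod_cast h2)]
    have hm0 : m < l.length := by omega
    simp only [getD_set', List.length_set, hm, hm0]
    split_ifs <;> first | rfl | omega | (exfalso; omega) | (simp_all)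

lemma pvInv_step (arr : List Int) (s t : List Int × Int) (m : Nat)
    (h : pvInv arr s.1 t.1 s.2 t.2 m) (hlen : m + 2 ≤ arr.length) :
    pvInv arr (pvStepA s ((m : Int) + 1)).1 (pvStepB arr t ((m : Int) + 1)).1
      (pvStepA s ((m : Int) + 1)).2 (pvStepB arr t ((m : Int) + 1)).2 (m + 1) := by
  obtain ⟨hA, hc, hcnt, hz, h01, hmain⟩ := h
  have hm1 : m < arr.length := by omega
  have hm2 : m + 1 < arr.length := by omega
  have hcm1 : t.1.getD (m+1) 0 = 0 := hz (m+1) (Or.inr (by omega))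
  have ei1 : ((m:Int)+1) - 1 = ((m:Nat):Int) := by push_cast; ring
  set a := arr.getD m 0 with ha
  set e1 := t.1.getD (m-1) 0 with he1
  set e2 := t.1.getD m 0 with he2
  have hS : pvPar t.1 m = e1 + e2 := by
    unfold pvPar; rw [hcm1]; ring
  have hreadA : PySem.List.pyGetD s.1 (((m:Int)+1) - 1) 0 = pvTw a (e1 + e2) := by
    rw [ei1, PySem.List.pyGetD_natCast, ← hS]; exact hmain m hm1
  have hreadArr : PySem.List.pyGetD arr (((m:Int)+1) - 1) 0 = a := by
    rw [ei1, PySem.List.pyGetD_natCast]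
  have hBsum : PySem.List.pyGetD t.1 (((m:Int)+1) - 1) 0 +
      (if ((m:Int)+1) ≥ 2 then PySem.List.pyGetD t.1 (((m:Int)+1) - 2) 0 else 0) = e2 + e1 := by
    rw [ei1, PySem.List.pyGetD_natCast]
    rcases Nat.eq_zero_or_pos m with h0 | h0
    · subst h0
      rw [if_neg (by norm_num)]
      have : e1 = 0 := by rw [he1]; exact hz 0 (Or.inl rfl)
      rw [this]
    · rw [if_pos (by push_cast; omega)]
      rw [show ((m:Int)+1) - 2 = ((m-1 : Nat):Int) by omega]
      rw [PySem.List.pyGetD_natCast]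
  rw [pvStepA, pvStepB]
  simp only [hreadA, hreadArr, hBsum]
  by_cases hcl : pvTw a (e1 + e2) = 0
  · rw [if_pos (by simpa using hcl)]
    rw [if_pos (by
      simp only [Bool.or_eq_true, Bool.and_eq_true, beq_iff_eq]
      unfold pvTw at hcl
      rcases Int.emod_two_eq (e1 + e2) with hp | hp <;> simp [hp] at hcl <;> omega)]
    have hm1t : m + 1 < t.1.length := by omega
    have hset : PySem.List.pySetD t.1 ((m:Int)+1) 1 = t.1.set (m+1) 1 := by
      rw [show ((m:Int)+1) = ((m+1:Nat):Int) by push_cast; ring, PySem.List.pySetD_natCast]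
    have hgs : ∀ u : Nat, (t.1.set (m+1) 1).getD u 0 = if u = m+1 then 1 else t.1.getD u 0 :=
      fun u => getD_set' _ _ _ _ hm1t
    have hpar' : ∀ k : Nat, pvPar (t.1.set (m+1) 1) k
        = pvPar t.1 k + (if k = m ∨ k = m+1 ∨ k = m+2 then 1 else 0) := by
      intro k
      unfold pvPar
      rw [hgs, hgs, hgs]
      by_cases h1 : k = m
      · subst h1
        rw [if_neg (by omega), if_neg (by omega), if_pos rfl, if_pos (by tauto), hcm1]; ring
      · by_cases h2 : k = m+1
        · subst h2
          rw [if_neg (by omega), if_pos rfl, if_neg (by omega), if_pos (by tauto), hcm1]; ring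
        · by_cases h3 : k = m+2
          · subst h3
            rw [if_pos (by omega), if_neg (by omega), if_neg (by omega), if_pos (by tauto)]
            rw [show m+2-1 = m+1 from rfl, hcm1]; ring
          · rw [if_neg (by omega), if_neg (by omega), if_neg (by omega), if_neg (by tauto)]; ring
    refine ⟨(pvFlip_length s.1 _).trans hA, ?_, by simp [hcnt], ?_, ?_, ?_⟩
    · rw [hset]; simp [hc]
    · intro u hu
      rw [hset, hgs, if_neg (by omega)]
      exact hz u (by omega)
    · intro u
      rw [hset, hgs]
      by_cases hu : u = m+1
      · rw [if_pos hu]; right; rfl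
      · rw [if_neg hu]; exact h01 u
    · intro k hk
      have hFk := pvFlip_getD s.1 m (by omega) k (by omega)
      rw [hA] at hFk
      show (pvFlip s.1 ((m:Int)+1)).getD k 0 = pvTw (arr.getD k 0) (pvPar (PySem.List.pySetD t.1 ((m:Int)+1) 1) k)
      rw [hset, hFk, hmain k hk, hpar' k]
      by_cases h1 : k = m ∨ k = m+1 ∨ (k = m+2 ∧ m+2 < arr.length)
      · rw [if_pos h1, if_pos (by tauto), pvTw_succ]
      · rw [if_neg h1, if_neg (by
          intro hcon
          rcases hcon with h | h | h
          · exact h1 (Or.inl h)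
          · exact h1 (Or.inr (Or.inl h))
          · exact h1 (Or.inr (Or.inr ⟨h, by omega⟩)))]
        rw [add_zero]
  · rw [if_neg (by simpa using hcl)]
    rw [if_neg (by
      simp only [Bool.or_eq_true, Bool.and_eq_true, beq_iff_eq]
      unfold pvTw at hcl
      rcases Int.emod_two_eq (e1 + e2) with hp | hp <;> simp [hp] at hcl <;> omega)]
    exact ⟨hA, hc, hcnt, fun u hu => hz u (by omega), h01, hmain⟩

lemma pvInv_loop (arr : List Int) (m : Nat) (hm : m + 1 ≤ arr.length) :
    pvInv arr
      ((PySem.List.pyRange 1 ((m : Int) + 1) 1).foldl pvStepA (arr, 0)).1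
      ((PySem.List.pyRange 1 ((m : Int) + 1) 1).foldl (pvStepB arr) (List.replicate (arr.length + 2) 0, 0)).1
      ((PySem.List.pyRange 1 ((m : Int) + 1) 1).foldl pvStepA (arr, 0)).2
      ((PySem.List.pyRange 1 ((m : Int) + 1) 1).foldl (pvStepB arr) (List.replicate (arr.length + 2) 0, 0)).2
      m := by
  induction m with
  | zero =>
      rw [show ((0:Nat):Int) + 1 = 1 by norm_num, PySem.List.pyRange_one_eq_nil (le_refl 1)]
      exact pvInv_zero arr
  | succ m ih =>
      rw [show (((m+1:Nat)):Int) + 1 = (((m:Nat):Int) + 1) + 1 by push_cast; ring]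
      rw [PySem.List.pyRange_one_succ_right (by push_cast; omega)]
      rw [List.foldl_append, List.foldl_append]
      simp only [List.foldl_cons, List.foldl_nil]
      exact pvInv_step arr _ _ m (ih (by omega)) (by omega)

lemma pvOkB_nat (arr c : List Int) (k : Nat) (hc0 : c.getD 0 0 = 0) :
    pvOkB arr c (k : Int) =
      (if (pvPar c k) % 2 = 0 then arr.getD k 0 == 1 else arr.getD k 0 == 0) := by
  unfold pvOkB pvPar
  have h1 : ((k : Int) + 1) = ((k + 1 : Nat) : Int) := by push_cast; ring
  rcases Nat.eq_zero_or_pos k with hk | hk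
  · subst hk
    rw [h1]
    rw [if_neg (show ¬ ((0:Nat):Int) ≥ 1 by norm_num)]
    simp only [PySem.List.pyGetD_natCast]
    rw [show (0:Nat) - 1 = 0 from rfl, hc0]
    simp only [zero_add, add_zero]
    simp
  · have h2 : ((k : Int) - 1) = ((k - 1 : Nat) : Int) := by omega
    have h3 : (k : Int) ≥ 1 := by exact_mod_cast hk
    simp only [h1, h2, if_pos h3, PySem.List.pyGetD_natCast]
    have : c.getD k 0 + c.getD (k+1) 0 + c.getD (k-1) 0
         = c.getD (k-1) 0 + c.getD k 0 + c.getD (k+1) 0 := by ring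
    rw [this]
    rcases Int.emod_two_eq (c.getD (k-1) 0 + c.getD k 0 + c.getD (k+1) 0) with h | h <;> simp [h]

lemma pvFinal_eq (arr Aarr c : List Int) (ca cb : Int) (m : Nat)
    (h : pvInv arr Aarr c ca cb m) :
    (if Aarr.all (fun x => x == 1) then ca else -1) =
    (if (PySem.List.pyRange 0 (arr.length : Int) 1).all (pvOkB arr c) then cb else -1) := by
  obtain ⟨hA, hc, hcnt, hz, h01, hmain⟩ := h
  have hc0 : c.getD 0 0 = 0 := hz 0 (Or.inl rfl)
  have hall : Aarr.all (fun x => x == 1) =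
      (PySem.List.pyRange 0 (arr.length : Int) 1).all (pvOkB arr c) := by
    rw [Bool.eq_iff_iff]
    rw [List.all_eq_true, List.all_eq_true]
    constructor
    · intro hl x hx
      rw [PySem.List.mem_pyRange_one] at hx
      obtain ⟨hx0, hx1⟩ := hx
      have hk : x = ((x.toNat : Nat) : Int) := by omega
      rw [hk, pvOkB_nat arr c x.toNat hc0]
      have hkl : x.toNat < arr.length := by omega
      have hme := hmain x.toNat hkl
      have hmem : Aarr.getD x.toNat 0 ∈ Aarr := by
        rw [List.getD_eq_getElem?_getD, List.getElem?_eq_getElem (by omega)]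
        exact List.getElem_mem _
      have hv := hl _ hmem
      rw [hme] at hv
      unfold pvTw at hv
      rcases Int.emod_two_eq (pvPar c x.toNat) with hp | hp <;>
        simp [hp] at hv ⊢ <;> omega
    · intro hl x hx
      obtain ⟨k, hk, rfl⟩ := List.getElem_of_mem hx
      have hkl : k < arr.length := by omega
      have hv := hl (k : Int) (by rw [PySem.List.mem_pyRange_one]; constructor <;> omega)
      rw [pvOkB_nat arr c k hc0] at hv
      have hm := hmain k hkl
      rw [← List.getD_eq_getElem _ 0 hk, hm]
      unfold pvTw
      rcases Int.emod_two_eq (pvPar c k) with hp | hp <;>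
        simp [hp] at hv ⊢ <;> omega
  rw [hall, hcnt]

-- ===== VERDICT (by name: the statement is the Claim_ definition above) =====
theorem min_clicks_to_make_all_ones_spec : Claim_equal_min_clicks_to_make_all_ones := by
  intro n arr _ hpre
  unfold Spec_min_clicks_to_make_all_ones min_clicks_to_make_all_ones min_clicks_to_make_all_ones_alt
  by_cases h1 : n ≤ 1
  · rw [PySem.List.pyRange_one_eq_nil h1]
    exact pvFinal_eq arr arr (List.replicate (arr.length + 2) 0) 0 0 0 (pvInv_zero arr)
  · push_neg at h1
    have hn : n = ((n - 1).toNat : Int) + 1 := by omega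
    have hm : (n - 1).toNat + 1 ≤ arr.length := by
      unfold Pre_min_clicks_to_make_all_ones at hpre; omega
    rw [hn]
    exact pvFinal_eq arr _ _ _ _ ((n - 1).toNat) (pvInv_loop arr ((n - 1).toNat) hm)
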